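-- pv_equiv track=rewrite | github.com/HoYoungChun/Problem_Solving | 삼성 SW 역량 테스트 기출/이차원 배열과 연산.py | op_R
-- ===== SOURCE A (Python) =====
-- from collections import Counter
--
-- def unpack_tuple_to_list(line):
--     """[(0,1),(2,3)] => [0,1,2,3]"""
--     temp_list = []
--     for l in line:
--         if l[0] != 0:  # 0은 무시
--             temp_list.append(l[0])
--             temp_list.append(l[1])
--     return temp_list
--
-- def op_R(graph):
--     new_graph = []
--     for line in graph:
--         new_line = Counter(line).most_common()
--         new_line.sort(key=lambda x: (x[1], x[0]))  # 등장횟수, 수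
--         new_line = unpack_tuple_to_list(new_line)
--         new_graph.append(new_line)
--
--     # 0 채우기
--     max_len = max(len(l) for l in new_graph)
--     for line in new_graph:
--         while len(line) != max_len:
--             line.append(0)
--
--     return new_graph
-- ===== SOURCE B (Python) =====
-- def op_R(graph):
--     rows = []
--     for line in graph:
--         s = sorted(line)
--         pairs = []
--         i = 0
--         n = len(s)
--         while i < n:                       # run-length scan over the sorted row
--             j = i
--             while j < n and s[j] == s[i]:
--                 j += 1
--             pairs.append((j - i, s[i]))    # (count, value)
--             i = j
--         pairs.sort()                       # lexicographic = by (count, value)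
--         rows.append([x for c, v in pairs if v != 0 for x in (v, c)])
--     max_len = max(len(r) for r in rows)    # raises ValueError on empty graph, like A
--     return [r + [0] * (max_len - len(r)) for r in rows]
-- ===== Notes on version B (the rewrite author's own statement) =====
-- stated objective: alternative
-- what changed: Counts per row by sorting the row and run-length scanning consecutive runs instead of building a Counter hash map, sorts the (count,value) pairs with a plain tuple sort instead of most_common followed by a keyed re-sort, and pads rows by list concatenation instead of a while-append loop.
-- outside the precondition, e.g. on op_R([]): A raises ValueError, B raises ValueError
import Mathlib
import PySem

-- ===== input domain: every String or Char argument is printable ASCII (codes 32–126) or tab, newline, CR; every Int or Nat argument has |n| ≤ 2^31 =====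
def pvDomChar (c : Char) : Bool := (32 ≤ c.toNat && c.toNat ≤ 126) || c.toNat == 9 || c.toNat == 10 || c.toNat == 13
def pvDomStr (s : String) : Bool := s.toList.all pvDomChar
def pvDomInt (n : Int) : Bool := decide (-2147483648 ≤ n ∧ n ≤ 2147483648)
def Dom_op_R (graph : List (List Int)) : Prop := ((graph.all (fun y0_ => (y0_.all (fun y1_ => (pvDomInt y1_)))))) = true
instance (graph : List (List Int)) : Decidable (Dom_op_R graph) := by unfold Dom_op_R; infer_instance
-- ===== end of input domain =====

-- B counts each row by sorting it and run-length scanning instead of Counter.most_common + keyed re-sort,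
-- and pads by concatenation instead of a while-append loop; same cost class, different decomposition.
-- A mutates the rows of its intermediate list in place while padding; the equivalence proved is about the return value.

-- ===== PORT A =====

-- unpack_tuple_to_list: 'for l in line: if l[0] != 0: append l[0]; append l[1]'
def unpackTupleToList (line : List (Int × Int)) : List Int :=
  line.foldl (fun acc p => if p.1 ≠ 0 then (acc ++ [p.1]) ++ [p.2] else acc) []

-- 'while len(line) != max_len: line.append(0)'.  m is the maximum of the row lengths, so
-- len(line) ≤ m and the loop runs exactly (m - len(line)) times; that count is passed as
-- structural fuel and the loop test 'len(line) < m' agrees with Python's '!=' on every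
-- reachable state (Python would diverge when len > m; that state is unreachable).
def padLoop (m : Int) : Nat → List Int → List Int
  | 0, line => line
  | fuel + 1, line => if (line.length : Int) < m then padLoop m fuel (line ++ [0]) else line

def padWhile (line : List Int) (m : Int) : List Int :=
  padLoop m (m - (line.length : Int)).toNat line

-- the body of A's first loop: Counter(line).most_common() (items sorted by count, descending,
-- stable), then new_line.sort(key=lambda x: (x[1], x[0])), then unpack_tuple_to_list
def aRow (line : List Int) : List Int :=
  unpackTupleToList
    (PySem.List.sorted2
      (PySem.List.sorted (PySem.Dict.counter line).items (fun p => p.2) true)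
      (fun p => p.2) (fun p => p.1) false)

def op_R (graph : List (List Int)) : List (List Int) :=
  let newGraph := graph.foldl (fun acc line => acc ++ [aRow line]) []
  -- max(len(l) for l in new_graph): ValueError on the empty graph (excluded by Pre_)
  match PySem.List.max? (newGraph.map (fun l => (l.length : Int))) (fun x => x) with
  | none => []
  | some m => newGraph.map (fun line => padWhile line m)

-- ===== PORT B =====

-- the two-index while scan of Source B: each outer step takes one run of equal elements
-- (the takeWhile prefix) and continues on the rest (dropWhile); every step consumes at
-- least one element, so the list length bounds the step count and serves as structural fuel.
def rleGo : Nat → List Int → List (Int × Int)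
  | _, [] => []
  | 0, _ :: _ => []
  | fuel + 1, x :: xs =>
      (((xs.takeWhile (· == x)).length : Int) + 1, x) :: rleGo fuel (xs.dropWhile (· == x))

def rleRuns (s : List Int) : List (Int × Int) := rleGo s.length s

-- the body of Source B's loop: run-length pairs of the sorted row, plain tuple sort, flatten
def bRow (line : List Int) : List Int :=
  (PySem.List.sorted2 (rleRuns (PySem.List.sorted line (fun x => x) false))
      (fun p => p.1) (fun p => p.2) false).flatMap
    (fun p => if p.2 ≠ 0 then [p.2, p.1] else [])

def op_R_alt (graph : List (List Int)) : List (List Int) :=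
  let rows := graph.map bRow
  match PySem.List.max? (rows.map (fun l => (l.length : Int))) (fun x => x) with
  | none => []
  | some m => rows.map (fun r => r ++ List.replicate ((m - (r.length : Int)).toNat) 0)

-- ===== PRECONDITION & SPEC =====
-- A's 'max(len(l) for l in new_graph)' raises ValueError on the empty graph; B raises there too.
def Pre_op_R (graph : List (List Int)) : Prop := graph ≠ []
instance (graph : List (List Int)) : Decidable (Pre_op_R graph) := by unfold Pre_op_R; infer_instance
def pvWitness_op_R : List (List Int) := [[1, 2, 1, 0]]

def Spec_op_R (graph : List (List Int)) (out : List (List Int)) : Prop := out = op_R_alt graph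
instance (graph : List (List Int)) (out : List (List Int)) : Decidable (Spec_op_R graph out) := by unfold Spec_op_R; infer_instance

-- ===== CLAIM (what is proved, stated in full; the proofs are below) =====
def Claim_equal_op_R : Prop := ∀ (graph : List (List Int)), Dom_op_R graph → Pre_op_R graph → Spec_op_R graph (op_R graph)

-- ===== LEMMAS AND PROOFS =====

-- value bound supplied by Dom_op_R; it lets a tuple key be encoded as one integer key
def pvBnd (v : Int) : Prop := -2147483648 ≤ v ∧ v ≤ 2147483648
-- integer encodings of the tuple keys (count, value): A sorts (value, count) pairs by
-- (x[1], x[0]), B sorts (count, value) pairs lexicographically; 2^34 dominates any value gap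
def keyA (p : Int × Int) : Int := p.2 * 17179869184 + p.1
def keyB (p : Int × Int) : Int := p.1 * 17179869184 + p.2

theorem insertBy_congr {α : Type} (b1 b2 : α → α → Bool) (x : α) (l : List α)
    (h : ∀ y ∈ l, b1 x y = b2 x y) :
    PySem.List.insertBy b1 x l = PySem.List.insertBy b2 x l := by
  induction l with
  | nil => rfl
  | cons y ys ih =>
      simp only [PySem.List.insertBy]
      rw [h y (by simp)]
      split
      · rfl
      · rw [ih (fun z hz => h z (by simp [hz]))]

theorem foldl_insertBy_congr {α : Type} (b1 b2 : α → α → Bool) (S : α → Prop)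
    (h : ∀ a b, S a → S b → b1 a b = b2 a b) :
    ∀ (xs acc : List α), (∀ x ∈ xs, S x) → (∀ x ∈ acc, S x) →
      xs.foldl (fun a x => PySem.List.insertBy b1 x a) acc
        = xs.foldl (fun a x => PySem.List.insertBy b2 x a) acc := by
  intro xs
  induction xs with
  | nil => intro acc _ _; rfl
  | cons x xs ih =>
      intro acc hxs hacc
      simp only [List.foldl_cons]
      rw [insertBy_congr b1 b2 x acc (fun y hy => h x y (hxs x (by simp)) (hacc y hy))]
      refine ih _ (fun z hz => hxs z (by simp [hz])) ?_
      intro z hz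
      rcases (PySem.List.insertBy_mem_iff b2 x z acc).mp hz with rfl | hz'
      · exact hxs z (by simp)
      · exact hacc z hz'

theorem sorted2_eq_sorted_A (xs : List (Int × Int)) (h : ∀ p ∈ xs, pvBnd p.1) :
    PySem.List.sorted2 xs (fun p => p.2) (fun p => p.1) false
      = PySem.List.sorted xs keyA false := by
  rw [PySem.List.sorted_eq_foldl_insertBy]
  refine foldl_insertBy_congr _ _ (fun p => pvBnd p.1) ?_ xs [] h (by simp)
  intro a b ha hb
  have hiff : (a.2 < b.2 ∨ (¬ b.2 < a.2 ∧ a.1 < b.1)) ↔ keyA a < keyA b := by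
    unfold keyA; unfold pvBnd at ha hb; omega
  simp only [← decide_not, ← Bool.decide_and, ← Bool.decide_or]
  exact decide_eq_decide.mpr hiff

theorem sorted2_eq_sorted_B (xs : List (Int × Int)) (h : ∀ p ∈ xs, pvBnd p.2) :
    PySem.List.sorted2 xs (fun p => p.1) (fun p => p.2) false
      = PySem.List.sorted xs keyB false := by
  rw [PySem.List.sorted_eq_foldl_insertBy]
  refine foldl_insertBy_congr _ _ (fun p => pvBnd p.2) ?_ xs [] h (by simp)
  intro a b ha hb
  have hiff : (a.1 < b.1 ∨ (¬ b.1 < a.1 ∧ a.2 < b.2)) ↔ keyB a < keyB b := by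
    unfold keyB; unfold pvBnd at ha hb; omega
  simp only [← decide_not, ← Bool.decide_and, ← Bool.decide_or]
  exact decide_eq_decide.mpr hiff

-- everything after the x-run of a ≤-sorted list is strictly above x
theorem mem_dropWhile_beq_lt {x y : Int} {xs : List Int}
    (hall : ∀ z ∈ xs, x ≤ z) (hxs : xs.Pairwise (· ≤ ·))
    (hy : y ∈ xs.dropWhile (· == x)) : x < y := by
  induction xs with
  | nil => simp at hy
  | cons z zs ih =>
      by_cases hz : (z == x) = true
      · simp only [List.dropWhile_cons, hz, if_true] at hy
        exact ih (fun w hw => hall w (by simp [hw])) (List.pairwise_cons.mp hxs).2 hy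
      · simp only [List.dropWhile_cons, hz] at hy
        simp only [Bool.false_eq_true, if_false] at hy
        have hxz : x < z :=
          lt_of_le_of_ne (hall z (by simp)) (fun hxz => hz (by simp [hxz.symm]))
        rcases List.mem_cons.mp hy with rfl | hy'
        · exact hxz
        · exact lt_of_lt_of_le hxz ((List.pairwise_cons.mp hxs).1 y hy')

-- the run-length scan of a ≤-sorted list: strictly increasing values, one pair (count v, v) per member v
theorem rleGo_spec : ∀ (fuel : Nat) (s : List Int), s.length ≤ fuel → s.Pairwise (· ≤ ·) →
    (rleGo fuel s).Pairwise (fun a b => a.2 < b.2) ∧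
      ∀ p : Int × Int, p ∈ rleGo fuel s ↔ p.2 ∈ s ∧ p.1 = (s.count p.2 : Int) := by
  intro fuel
  induction fuel with
  | zero =>
      intro s hlen _
      have hs : s = [] := List.eq_nil_of_length_eq_zero (Nat.le_zero.mp hlen)
      subst hs; simp [rleGo]
  | succ fuel ih =>
      intro s hlen hs
      match s with
      | [] => simp [rleGo]
      | x :: xs =>
        have hcons := List.pairwise_cons.mp hs
        have hsplit : xs.takeWhile (· == x) ++ xs.dropWhile (· == x) = xs :=
          List.takeWhile_append_dropWhile
        have htx : ∀ y ∈ xs.takeWhile (· == x), y = x := by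
          intro y hy; simpa using List.mem_takeWhile_imp hy
        have hdpw : (xs.dropWhile (· == x)).Pairwise (· ≤ ·) :=
          List.Pairwise.sublist (List.dropWhile_sublist _) hcons.2
        have hxd : ∀ y ∈ xs.dropWhile (· == x), x < y :=
          fun y hy => mem_dropWhile_beq_lt hcons.1 hcons.2 hy
        have hxnd : x ∉ xs.dropWhile (· == x) := fun hx => lt_irrefl x (hxd x hx)
        have hlend : (xs.dropWhile (· == x)).length ≤ fuel :=
          le_trans (List.length_dropWhile_le _ _) (Nat.le_of_succ_le_succ hlen)
        obtain ⟨ihpw, ihmem⟩ := ih (xs.dropWhile (· == x)) hlend hdpw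
        have hxsc : ∀ v : Int, xs.count v
            = (xs.takeWhile (· == x)).count v + (xs.dropWhile (· == x)).count v := by
          intro v
          conv_lhs => rw [← hsplit]
          rw [List.count_append]
        have hcx : (x :: xs).count x = (xs.takeWhile (· == x)).length + 1 := by
          rw [List.count_cons_self, hxsc x,
            List.count_eq_length.mpr (fun b hb => (htx b hb).symm),
            List.count_eq_zero.mpr hxnd]
        have hcv : ∀ v : Int, v ≠ x → (x :: xs).count v = (xs.dropWhile (· == x)).count v := by
          intro v hv
          rw [List.count_cons_of_ne (Ne.symm hv), hxsc v,
            List.count_eq_zero.mpr (fun hvt => hv (htx v hvt)), Nat.zero_add]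
        constructor
        · rw [rleGo]
          refine List.pairwise_cons.mpr ⟨?_, ihpw⟩
          intro q hq
          exact hxd q.2 ((ihmem q).mp hq).1
        · intro p
          rw [rleGo]
          simp only [List.mem_cons, ihmem]
          constructor
          · rintro (rfl | ⟨hmem, hcnt⟩)
            · exact ⟨by simp, by rw [hcx]; push_cast; ring⟩
            · refine ⟨Or.inr ((List.dropWhile_sublist _).subset hmem), ?_⟩
              rw [hcnt, hcv p.2 (ne_of_gt (hxd p.2 hmem))]
          · rintro ⟨hmem, hcnt⟩
            by_cases hpx : p.2 = x
            · left
              have : p.1 = ((xs.takeWhile (· == x)).length : Int) + 1 := by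
                rw [hcnt, hpx, hcx]; push_cast; ring
              exact Prod.ext_iff.mpr ⟨this, hpx⟩
            · right
              have hpxs : p.2 ∈ xs := by
                rcases hmem with h | h
                · exact absurd h hpx
                · exact h
              have hpd : p.2 ∈ xs.dropWhile (· == x) := by
                rw [← hsplit] at hpxs
                rcases List.mem_append.mp hpxs with h | h
                · exact absurd (htx _ h) hpx
                · exact h
              exact ⟨hpd, by rw [hcnt, hcv p.2 hpx]⟩

-- unpack_tuple_to_list is the zero-skipping flatten
theorem unpack_eq_flatMap (l : List (Int × Int)) :
    unpackTupleToList l = l.flatMap (fun p => if p.1 ≠ 0 then [p.1, p.2] else []) := by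
  unfold unpackTupleToList
  have hbody : (fun (acc : List Int) (p : Int × Int) =>
        if p.1 ≠ 0 then (acc ++ [p.1]) ++ [p.2] else acc)
      = fun acc p => acc ++ (if p.1 ≠ 0 then [p.1, p.2] else []) := by
    funext acc p; split <;> simp
  rw [hbody, PySem.List.foldl_append_eq_flatMap, List.nil_append]

-- the pad-while loop is concatenation with zeros
theorem padLoop_eq : ∀ (fuel : Nat) (line : List Int) (m : Int),
    (m - (line.length : Int)).toNat = fuel →
    padLoop m fuel line = line ++ List.replicate fuel 0 := by
  intro fuel
  induction fuel with
  | zero => intro line m _; simp [padLoop]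
  | succ fuel ih =>
      intro line m hf
      have hlt : (line.length : Int) < m := by omega
      rw [padLoop, if_pos hlt, ih (line ++ [0]) m (by simp; omega)]
      simp [List.replicate_succ]

theorem padWhile_eq (line : List Int) (m : Int) :
    padWhile line m = line ++ List.replicate ((m - (line.length : Int)).toNat) 0 :=
  padLoop_eq _ line m rfl

-- the per-row equality: A's Counter/most_common/keyed-sort row equals B's sort/run-length row
theorem row_eq (line : List Int) (hb : ∀ v ∈ line, pvBnd v) : aRow line = bRow line := by
  have hs : (PySem.List.sorted line (fun x => x) false).Pairwise (· ≤ ·) :=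
    PySem.List.sorted_pairwise line (fun x => x)
  obtain ⟨hPpw, hPmem⟩ := rleGo_spec _ _ le_rfl hs
  have hPmem' : ∀ p : Int × Int, p ∈ rleRuns (PySem.List.sorted line (fun x => x) false) ↔
      p.2 ∈ line ∧ p.1 = (line.count p.2 : Int) := by
    intro p
    rw [rleRuns, hPmem p, PySem.List.mem_sorted,
      (PySem.List.sorted_perm line (fun x => x) false).count_eq]
  have hPnd : (rleRuns (PySem.List.sorted line (fun x => x) false)).Nodup :=
    hPpw.imp (fun h => fun he => absurd (congrArg Prod.snd he) (ne_of_lt h))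
  -- A's pair list: the counter items
  have hQmem : ∀ q : Int × Int, q ∈ (PySem.Dict.counter line).items ↔
      q.1 ∈ line ∧ q.2 = (line.count q.1 : Int) := by
    intro q
    rw [PySem.Dict.items_counter]
    constructor
    · intro hq
      rcases List.mem_map.mp hq with ⟨k, hk, rfl⟩
      exact ⟨(PySem.Set.mem_ofList line k).mp hk, rfl⟩
    · rintro ⟨h1, h2⟩
      exact List.mem_map.mpr ⟨q.1, (PySem.Set.mem_ofList line q.1).mpr h1,
        (Prod.ext_iff.mpr ⟨rfl, h2.symm⟩ : (q.1, (line.count q.1 : Int)) = q)⟩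
  have hQnd : (PySem.Dict.counter line).items.Nodup := by
    rw [PySem.Dict.items_counter]
    exact (PySem.Set.nodup_ofList line).map
      (fun a b h => congrArg Prod.fst h)
  -- most_common is a permutation of the items
  have hQ'perm := PySem.List.sorted_perm (PySem.Dict.counter line).items (fun p => p.2) true
  have hQ'nd := hQ'perm.nodup_iff.mpr hQnd
  have hQ'bnd : ∀ p ∈ PySem.List.sorted (PySem.Dict.counter line).items (fun p => p.2) true,
      pvBnd p.1 := by
    intro p hp
    exact hb p.1 ((hQmem p).mp ((PySem.List.mem_sorted _ _ _ p).mp hp)).1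
  have hPbnd : ∀ p ∈ rleRuns (PySem.List.sorted line (fun x => x) false), pvBnd p.2 :=
    fun p hp => hb p.2 ((hPmem' p).mp hp).1
  -- swap of B's pairs is a permutation of A's pairs
  have hswapmem : ∀ a : Int × Int,
      a ∈ (rleRuns (PySem.List.sorted line (fun x => x) false)).map Prod.swap ↔
        a.1 ∈ line ∧ a.2 = (line.count a.1 : Int) := by
    intro a
    constructor
    · intro ha
      rcases List.mem_map.mp ha with ⟨p, hp, rfl⟩
      rcases (hPmem' p).mp hp with ⟨h1, h2⟩
      exact ⟨h1, h2⟩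
    · rintro ⟨h1, h2⟩
      exact List.mem_map.mpr ⟨a.swap, (hPmem' a.swap).mpr ⟨h1, h2⟩, Prod.swap_swap a⟩
  have hperm : ((rleRuns (PySem.List.sorted line (fun x => x) false)).map Prod.swap).Perm
      (PySem.Dict.counter line).items := by
    refine (List.perm_ext_iff_of_nodup (hPnd.map Prod.swap_injective) hQnd).mpr ?_
    intro a; rw [hswapmem a, hQmem a]
  -- the central sorted-list identity
  have hkey : PySem.List.sorted
        (PySem.List.sorted (PySem.Dict.counter line).items (fun p => p.2) true) keyA false
      = (PySem.List.sorted (rleRuns (PySem.List.sorted line (fun x => x) false))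
          keyB false).map Prod.swap := by
    refine PySem.List.sorted_eq_of_perm_of_pairwise_lt _ _ _ ?_ ?_
    · exact (((PySem.List.sorted_perm _ keyB false).map Prod.swap).trans hperm).trans
        hQ'perm.symm
    · have h1 : ((PySem.List.sorted (rleRuns (PySem.List.sorted line (fun x => x) false))
          keyB false).map Prod.swap).Pairwise (fun a b => keyA a ≤ keyA b) := by
        rw [List.pairwise_map]
        exact PySem.List.sorted_pairwise _ keyB
      have hnd : ((PySem.List.sorted (rleRuns (PySem.List.sorted line (fun x => x) false))
          keyB false).map Prod.swap).Nodup :=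
        ((((PySem.List.sorted_perm _ keyB false).map Prod.swap).trans hperm).trans
          hQ'perm.symm).nodup_iff.mpr hQ'nd
      have hmb : ∀ a ∈ (PySem.List.sorted (rleRuns
          (PySem.List.sorted line (fun x => x) false)) keyB false).map Prod.swap,
          pvBnd a.1 := by
        intro a ha
        have : a ∈ (PySem.Dict.counter line).items :=
          (((PySem.List.sorted_perm _ keyB false).map Prod.swap).trans hperm).subset ha
        exact hb a.1 ((hQmem a).mp this).1
      refine (h1.and hnd).imp_of_mem ?_
      intro a b ha hbmem hab
      rcases hab with ⟨hle, hne⟩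
      rcases hmb a ha with ⟨ha1, ha2⟩
      rcases hmb b hbmem with ⟨hb1, hb2⟩
      rcases lt_or_eq_of_le hle with h | h
      · exact h
      · exfalso
        apply hne
        have h12 : a.1 = b.1 ∧ a.2 = b.2 := by unfold keyA at h; constructor <;> omega
        exact Prod.ext h12.1 h12.2
  -- assemble
  unfold aRow bRow
  rw [sorted2_eq_sorted_A _ hQ'bnd, sorted2_eq_sorted_B _ hPbnd, unpack_eq_flatMap, hkey,
    List.flatMap_map]
  rfl

-- ===== VERDICT (by name: the statement is the Claim_ definition above) =====
theorem op_R_spec : Claim_equal_op_R := by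
  intro graph hdom _hpre
  unfold Spec_op_R op_R op_R_alt
  have hbnd : ∀ line ∈ graph, ∀ v ∈ line, pvBnd v := by
    unfold Dom_op_R at hdom
    simp only [List.all_eq_true, pvDomInt, decide_eq_true_eq] at hdom
    exact hdom
  have hrows : graph.foldl (fun acc line => acc ++ [aRow line]) [] = graph.map bRow := by
    rw [PySem.List.foldl_append_singleton_eq_map, List.nil_append]
    exact List.map_congr_left (fun line hl => row_eq line (hbnd line hl))
  simp only [hrows]
  cases PySem.List.max? ((graph.map bRow).map (fun l => (l.length : Int))) (fun x => x) with
  | none => rfl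
  | some m =>
      simp only []
      exact List.map_congr_left (fun r _ => padWhile_eq r m)
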